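-- pv_equiv track=rewrite | github.com/OmFukat-Dev/Fake-Job-Prediction-Using-Deep-Learning | app.py | compute_overall_verdict
-- ===== SOURCE A (Python) =====
-- def compute_overall_verdict(matching_jobs, scrape_ok, checklist, fraud_score=0, company_verified=False, dynamic_site=False):
--     """Return verdict string: VERIFIED, GENUINE_LIKELY, UNVERIFIED, INCONCLUSIVE, HIGH_RISK."""
--     # Strong positive signals
--     if matching_jobs:
--         return "VERIFIED"
--     if any(item[1].get("status") == "verified" for item in checklist):
--         return "VERIFIED"
--     # High fraud score overrides
--     if fraud_score >= 70:
--         return "HIGH_RISK"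
--     # Strong negative signals
--     if any(item[1].get("status") == "blocked" for item in checklist):
--         return "HIGH_RISK"
--     # Company is verified but portal is JS-heavy          cannot scrape, but company is REAL
--     # This is the key fix: don't label real jobs as INCONCLUSIVE just because we can't scrape
--     if company_verified and dynamic_site and not scrape_ok:
--         return "GENUINE_LIKELY"
--     # If we scraped and did not find the role, mark unverified (not fake)
--     if scrape_ok:
--         return "UNVERIFIED"
--     return "INCONCLUSIVE"
-- ===== SOURCE B (Python) =====
-- VERDICTS = ("VERIFIED", "HIGH_RISK", "GENUINE_LIKELY", "UNVERIFIED", "INCONCLUSIVE")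
-- STATUS_RANK = {"verified": 0, "blocked": 1}
--
-- def compute_overall_verdict(matching_jobs, scrape_ok, checklist, fraud_score=0, company_verified=False, dynamic_site=False):
--     """Return verdict string: VERIFIED, GENUINE_LIKELY, UNVERIFIED, INCONCLUSIVE, HIGH_RISK.
--
--     Priority encoding: every signal emits a numeric rank (lower = stronger);
--     the verdict is the table entry at the minimum emitted rank."""
--     signals = [4]  # default: INCONCLUSIVE
--     if matching_jobs:
--         signals.append(0)
--     if fraud_score >= 70:
--         signals.append(1)
--     if company_verified and dynamic_site and not scrape_ok:
--         signals.append(2)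
--     if scrape_ok:
--         signals.append(3)
--     for item in checklist:
--         rank = STATUS_RANK.get(item[1].get("status"))
--         if rank is not None:
--             signals.append(rank)
--     return VERDICTS[min(signals)]
-- ===== Notes on version B (the rewrite author's own statement) =====
-- stated objective: alternative
-- what changed: B replaces A's if/elif decision ladder and two any() scans with a priority encoding: every signal (matching jobs, checklist statuses via a rank table, fraud score, JS-heavy-but-verified, scrape result) emits a numeric rank into a list and the verdict is a lookup table indexed by the minimum rank.
import Mathlib
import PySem

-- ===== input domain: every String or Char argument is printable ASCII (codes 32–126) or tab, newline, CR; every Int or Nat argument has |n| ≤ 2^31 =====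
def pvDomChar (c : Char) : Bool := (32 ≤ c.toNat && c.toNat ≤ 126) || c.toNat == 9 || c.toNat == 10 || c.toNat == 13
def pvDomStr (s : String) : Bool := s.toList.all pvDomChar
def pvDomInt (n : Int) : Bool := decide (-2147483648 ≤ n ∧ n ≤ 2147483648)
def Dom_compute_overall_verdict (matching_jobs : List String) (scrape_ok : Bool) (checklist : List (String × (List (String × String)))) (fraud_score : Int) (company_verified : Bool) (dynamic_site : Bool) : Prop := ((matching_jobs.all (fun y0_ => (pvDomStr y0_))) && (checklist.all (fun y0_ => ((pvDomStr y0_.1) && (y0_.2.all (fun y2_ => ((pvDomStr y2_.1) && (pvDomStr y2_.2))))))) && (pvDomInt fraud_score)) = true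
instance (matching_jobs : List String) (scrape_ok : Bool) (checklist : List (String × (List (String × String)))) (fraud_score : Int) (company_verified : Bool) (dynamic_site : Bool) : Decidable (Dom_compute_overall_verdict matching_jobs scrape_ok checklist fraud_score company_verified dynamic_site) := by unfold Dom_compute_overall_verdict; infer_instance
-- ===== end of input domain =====

-- B replaces A's if/elif ladder by a priority encoding: each signal emits a numeric rank and the verdict is a table lookup at the minimum rank; alternative decomposition, same cost.

-- ===== PORT A =====
def compute_overall_verdict (matching_jobs : List String) (scrape_ok : Bool) (checklist : List (String × (List (String × String)))) (fraud_score : Int) (company_verified : Bool) (dynamic_site : Bool) : String :=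
  if !matching_jobs.isEmpty then "VERIFIED"
  else if checklist.any (fun item => (PySem.Dict.mk item.2).get? "status" == some "verified") then "VERIFIED"
  else if fraud_score ≥ 70 then "HIGH_RISK"
  else if checklist.any (fun item => (PySem.Dict.mk item.2).get? "status" == some "blocked") then "HIGH_RISK"
  else if company_verified && dynamic_site && !scrape_ok then "GENUINE_LIKELY"
  else if scrape_ok then "UNVERIFIED"
  else "INCONCLUSIVE"

-- ===== PORT B =====
def cov_VERDICTS : List String := ["VERIFIED", "HIGH_RISK", "GENUINE_LIKELY", "UNVERIFIED", "INCONCLUSIVE"]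

-- STATUS_RANK.get(status) where status is item[1].get("status") (an Option in the port)
def cov_statusRank (status : Option String) : Option Int :=
  match status with
  | some s => (PySem.Dict.mk [("verified", (0 : Int)), ("blocked", 1)]).get? s
  | none => none

def cov_addRanks (signals : List Int) (checklist : List (String × (List (String × String)))) : List Int :=
  checklist.foldl (fun acc item =>
    match cov_statusRank ((PySem.Dict.mk item.2).get? "status") with
    | some r => acc ++ [r]
    | none => acc) signals

def compute_overall_verdict_alt (matching_jobs : List String) (scrape_ok : Bool) (checklist : List (String × (List (String × String)))) (fraud_score : Int) (company_verified : Bool) (dynamic_site : Bool) : String :=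
  let s0 : List Int := [4]
  let s1 := if !matching_jobs.isEmpty then s0 ++ [0] else s0
  let s2 := if fraud_score ≥ 70 then s1 ++ [1] else s1
  let s3 := if company_verified && dynamic_site && !scrape_ok then s2 ++ [2] else s2
  let s4 := if scrape_ok then s3 ++ [3] else s3
  let signals := cov_addRanks s4 checklist
  match PySem.List.min? signals (fun x => x) with
  | some m => (PySem.List.pyGet? cov_VERDICTS m).getD ""  -- signals is nonempty and m ∈ [0,4], so neither fallback fires
  | none => ""

-- ===== PRECONDITION & SPEC =====
def Spec_compute_overall_verdict (matching_jobs : List String) (scrape_ok : Bool) (checklist : List (String × (List (String × String)))) (fraud_score : Int) (company_verified : Bool) (dynamic_site : Bool) (out : String) : Prop := out = compute_overall_verdict_alt matching_jobs scrape_ok checklist fraud_score company_verified dynamic_site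
instance (matching_jobs : List String) (scrape_ok : Bool) (checklist : List (String × (List (String × String)))) (fraud_score : Int) (company_verified : Bool) (dynamic_site : Bool) (out : String) : Decidable (Spec_compute_overall_verdict matching_jobs scrape_ok checklist fraud_score company_verified dynamic_site out) := by unfold Spec_compute_overall_verdict; infer_instance

-- ===== CLAIM (what is proved, stated in full; the proofs are below) =====
def Claim_equal_compute_overall_verdict : Prop := ∀ (matching_jobs : List String) (scrape_ok : Bool) (checklist : List (String × (List (String × String)))) (fraud_score : Int) (company_verified : Bool) (dynamic_site : Bool), Dom_compute_overall_verdict matching_jobs scrape_ok checklist fraud_score company_verified dynamic_site → Spec_compute_overall_verdict matching_jobs scrape_ok checklist fraud_score company_verified dynamic_site (compute_overall_verdict matching_jobs scrape_ok checklist fraud_score company_verified dynamic_site)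

-- ===== LEMMAS AND PROOFS =====

-- the checklist loop only extends the signals list
lemma cov_addRanks_append (s : List Int) (cl : List (String × (List (String × String)))) :
    cov_addRanks s cl = s ++ cov_addRanks [] cl := by
  induction cl generalizing s with
  | nil => simp [cov_addRanks]
  | cons h t ih =>
    simp only [cov_addRanks, List.foldl_cons]
    cases hr : cov_statusRank ((PySem.Dict.mk h.2).get? "status") with
    | none =>
      simp only [hr]
      exact ih s
    | some r =>
      simp only [hr, List.nil_append]
      rw [show (List.foldl _ (s ++ [r]) t = cov_addRanks (s ++ [r]) t) from rfl,
          show (List.foldl _ ([r] : List Int) t = cov_addRanks [r] t) from rfl,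
          ih (s ++ [r]), ih [r]]
      simp

-- the running min over the checklist's emitted ranks, in terms of the two any() flags
lemma cov_fold_min (cl : List (String × (List (String × String)))) (a : Int) :
    (cov_addRanks [] cl).foldl min a =
      (if cl.any (fun item => (PySem.Dict.mk item.2).get? "status" == some "verified") then min a 0
       else if cl.any (fun item => (PySem.Dict.mk item.2).get? "status" == some "blocked") then min a 1
       else a) := by
  induction cl generalizing a with
  | nil => simp [cov_addRanks]
  | cons h t ih =>
    rw [show cov_addRanks [] (h :: t) =
          cov_addRanks (match cov_statusRank ((PySem.Dict.mk h.2).get? "status") with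
                        | some r => ([] : List Int) ++ [r] | none => []) t from rfl]
    rcases hst : (PySem.Dict.mk h.2).get? "status" with _ | s
    · simp only [show cov_statusRank none = none from rfl]
      rw [ih a]
      simp only [List.any_cons, hst]
      simp only [Option.none_beq_some, Bool.false_or]
    · by_cases hv : s = "verified"
      · subst hv
        simp only [show cov_statusRank (some "verified") = some 0 from by decide,
          List.nil_append]
        rw [cov_addRanks_append ([0] : List Int) t, List.foldl_append]
        simp only [List.foldl_cons, List.foldl_nil]
        rw [ih (min a 0)]
        simp only [List.any_cons, hst, beq_self_eq_true, Bool.true_or, if_true]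
        split_ifs <;> omega
      · by_cases hb : s = "blocked"
        · subst hb
          simp only [show cov_statusRank (some "blocked") = some 1 from by decide,
            List.nil_append]
          rw [cov_addRanks_append ([1] : List Int) t, List.foldl_append]
          simp only [List.foldl_cons, List.foldl_nil]
          rw [ih (min a 1)]
          have h1 : ((PySem.Dict.mk h.2).get? "status" == some "verified") = false := by
            simp [hst, hv]
          have h2 : ((PySem.Dict.mk h.2).get? "status" == some "blocked") = true := by
            simp [hst]
          simp only [List.any_cons, h1, h2, Bool.false_or, Bool.true_or, if_true]
          split_ifs <;> omega
        · have hrk : cov_statusRank (some s) = none := by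
            simp only [cov_statusRank, PySem.Dict.get?, PySem.Dict.mk]
            simp
            exact ⟨fun h' => hv h'.symm, fun h' => hb h'.symm⟩
          simp only [hrk]
          rw [ih a]
          have h1 : ((PySem.Dict.mk h.2).get? "status" == some "verified") = false := by
            simp [hst, hv]
          have h2 : ((PySem.Dict.mk h.2).get? "status" == some "blocked") = false := by
            simp [hst, hb]
          simp only [List.any_cons, h1, h2, Bool.false_or]

-- the whole min over the emitted-signal list, for a nonempty scalar prefix
lemma cov_min_eval (x : Int) (xs : List Int) (cl : List (String × (List (String × String)))) :
    PySem.List.min? (cov_addRanks (x :: xs) cl) (fun y => y) =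
      some (if cl.any (fun item => (PySem.Dict.mk item.2).get? "status" == some "verified")
              then min (xs.foldl min x) 0
            else if cl.any (fun item => (PySem.Dict.mk item.2).get? "status" == some "blocked")
              then min (xs.foldl min x) 1
            else xs.foldl min x) := by
  rw [cov_addRanks_append (x :: xs) cl,
      show ((x :: xs) ++ cov_addRanks [] cl) = x :: (xs ++ cov_addRanks [] cl) from rfl,
      PySem.List.min?_id_cons, List.foldl_append, cov_fold_min cl (xs.foldl min x)]

-- ===== VERDICT (by name: the statement is the Claim_ definition above) =====
theorem compute_overall_verdict_spec : Claim_equal_compute_overall_verdict := by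
  intro mj ok cl fs cv ds _
  unfold Spec_compute_overall_verdict compute_overall_verdict compute_overall_verdict_alt
  cases hv : cl.any (fun item => (PySem.Dict.mk item.2).get? "status" == some "verified") <;>
    cases hb : cl.any (fun item => (PySem.Dict.mk item.2).get? "status" == some "blocked") <;>
      cases hmj : mj.isEmpty <;>
        by_cases hfs : fs ≥ 70 <;>
          cases hok : ok <;>
            cases hcv : cv <;>
              cases hds : ds <;>
                simp only [hmj, hfs, hok, hcv, hds, Bool.not_true, Bool.not_false, Bool.true_and,
                  Bool.false_and, Bool.and_true, Bool.and_false, Bool.and_self, if_true, if_false,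
                  ite_true, ite_false] <;>
                simp only [Bool.false_eq_true, if_false, if_true, List.cons_append, List.nil_append] <;>
                rw [cov_min_eval] <;>
                simp only [hv, hb, if_true, if_false, ite_true, ite_false] <;>
                decide
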